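-- pv_equiv track=rewrite | github.com/Kiru1288/NHL-Dynasty-Mode | SimEngine/app/sim_engine/world/calendar.py | rest_days_before
-- ===== SOURCE A (Python) =====
-- from typing import Any, Dict, List, Set, Tuple
--
-- def rest_days_before(play_days: Set[int], day: int) -> int:
--     """Consecutive off days immediately before this game day (0 if played yesterday)."""
--     if (day - 1) in play_days:
--         return 0
--     k = 0
--     t = day - 1
--     while t not in play_days and t > 0:
--         k += 1
--         t -= 1
--         if k > 14:
--             break
--     return k
-- ===== SOURCE B (Python) =====
-- def rest_days_before(play_days, day):
--     """Consecutive off days immediately before this game day (0 if played yesterday)."""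
--     prev = max((p for p in play_days if p < day), default=0)
--     barrier = max(prev, 0)
--     return max(0, min(15, day - 1 - barrier))
-- ===== Notes on version B (the rewrite author's own statement) =====
-- stated objective: simpler
-- what changed: Replaces the day-by-day decrementing while-loop with repeated membership tests by a single reduction: find the most recent prior play day (clamped at 0) and compute the rest count by subtraction capped at 15.
import Mathlib
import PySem

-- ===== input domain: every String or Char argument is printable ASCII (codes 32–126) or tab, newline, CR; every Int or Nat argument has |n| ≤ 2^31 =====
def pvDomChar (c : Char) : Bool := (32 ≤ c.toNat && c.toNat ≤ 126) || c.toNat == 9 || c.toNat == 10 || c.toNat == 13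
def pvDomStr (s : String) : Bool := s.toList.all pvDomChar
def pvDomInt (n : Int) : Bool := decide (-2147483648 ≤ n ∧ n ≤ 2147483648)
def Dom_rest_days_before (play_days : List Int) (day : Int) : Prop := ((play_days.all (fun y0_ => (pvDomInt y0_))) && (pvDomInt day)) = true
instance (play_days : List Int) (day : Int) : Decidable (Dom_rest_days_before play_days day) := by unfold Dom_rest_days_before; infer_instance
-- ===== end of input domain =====

-- B replaces the day-by-day decrementing loop with one reduction (latest prior play day) plus a capped subtraction; objective: simpler.


-- ===== PORT A =====
-- the while loop: k counts off days; break once k > 14.  k is a Nat counter (it starts at 0 and only increments).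
def restLoopA (play_days : List Int) (t : Int) (k : Nat) : Int :=
  if t ∉ play_days ∧ t > 0 then
    let k' := k + 1
    let t' := t - 1
    if k' > 14 then (k' : Int)
    else restLoopA play_days t' k'
  else (k : Int)
termination_by 15 - k
decreasing_by omega

def rest_days_before (play_days : List Int) (day : Int) : Int :=
  if (day - 1) ∈ play_days then 0
  else restLoopA play_days (day - 1) 0

-- ===== PORT B =====
def rest_days_before_alt (play_days : List Int) (day : Int) : Int :=
  let prev := (PySem.List.max? (play_days.filter (fun p => p < day)) (fun p => p)).getD 0
  let barrier := max prev 0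
  max 0 (min 15 (day - 1 - barrier))

-- ===== PRECONDITION & SPEC =====
def Spec_rest_days_before (play_days : List Int) (day : Int) (out : Int) : Prop := out = rest_days_before_alt play_days day
instance (play_days : List Int) (day : Int) (out : Int) : Decidable (Spec_rest_days_before play_days day out) := by unfold Spec_rest_days_before; infer_instance

-- ===== CLAIM (what is proved, stated in full; the proofs are below) =====
def Claim_equal_rest_days_before : Prop := ∀ (play_days : List Int) (day : Int), Dom_rest_days_before play_days day → Spec_rest_days_before play_days day (rest_days_before play_days day)

-- ===== LEMMAS AND PROOFS =====

-- loop characterisation: if b is the clamped barrier (0 or a play day, no play day strictly between b and t),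
-- the loop starting at t with counter k returns k plus the capped distance t - b.
theorem restLoopA_eq (play_days : List Int) (b : Int)
    (hb0 : 0 ≤ b) (hbmem : b = 0 ∨ b ∈ play_days) :
    ∀ (k : Nat) (t : Int), k ≤ 14 → b ≤ t → (∀ p ∈ play_days, b < p → t < p) →
    restLoopA play_days t k = (k : Int) + max 0 (min (15 - (k : Int)) (t - b)) := by
  suffices h : ∀ (n : Nat) (k : Nat) (t : Int), 15 - k = n → k ≤ 14 → b ≤ t →
      (∀ p ∈ play_days, b < p → t < p) →
      restLoopA play_days t k = (k : Int) + max 0 (min (15 - (k : Int)) (t - b)) by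
    intro k t hk hbt hgap
    exact h (15 - k) k t rfl hk hbt hgap
  intro n
  induction n with
  | zero => intro k t hn hk; omega
  | succ n ih =>
    intro k t hn hk hbt hgap
    by_cases hcond : t ∉ play_days ∧ t > 0
    · obtain ⟨hnot, htpos⟩ := hcond
      have htb : b < t := by
        rcases lt_or_eq_of_le hbt with h | h
        · exact h
        · rcases hbmem with h0 | hmem
          · omega
          · exact absurd (h ▸ hmem) hnot
      rw [restLoopA, if_pos (And.intro hnot htpos)]
      by_cases hk' : k + 1 > 14
      · -- break: k = 14, returns 15
        simp only [if_pos hk']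
        have : k = 14 := by omega
        subst this
        push_cast
        omega
      · -- recurse
        simp only [if_neg hk']
        rw [ih (k + 1) (t - 1) (by omega) (by omega) (by omega)
          (by intro p hp hbp; have := hgap p hp hbp; omega)]
        push_cast
        omega
    · -- loop condition fails: t ∈ play_days or t ≤ 0
      rw [restLoopA, if_neg hcond]
      have : t = b := by
        by_cases hmem : t ∈ play_days
        · have h1 : ¬ (b < t) := fun hlt => absurd (hgap t hmem hlt) (by omega)
          omega
        · have htle : t ≤ 0 := by
            rcases not_and_or.mp hcond with h | h
            · exact absurd hmem h
            · omega
          omega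
      omega

theorem rest_days_before_spec_raw (play_days : List Int) (day : Int) :
    rest_days_before play_days day = rest_days_before_alt play_days day := by
  unfold rest_days_before rest_days_before_alt
  dsimp only
  set fl := play_days.filter (fun p => p < day) with hfl
  set prev := (PySem.List.max? fl (fun p => p)).getD 0 with hprev
  set b := max prev 0 with hb
  -- facts about prev / b
  have hmax_le : ∀ p ∈ play_days, p < day → p ≤ prev := by
    intro p hp hpd
    have hpfl : p ∈ fl := by simp [hfl, List.mem_filter, hp, hpd]
    rcases hm : PySem.List.max? fl (fun p => p) with _ | m
    · exact absurd ((PySem.List.max?_eq_none_iff _ _).mp hm ▸ hpfl) (List.not_mem_nil)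
    · have := PySem.List.max?_isMax hm p hpfl
      simp [hprev, hm] at this ⊢
      exact this
  have hbmem : b = 0 ∨ b ∈ play_days := by
    by_cases h : prev ≤ 0
    · left; omega
    · right
      have hbp : b = prev := by omega
      rcases hm : PySem.List.max? fl (fun p => p) with _ | m
      · simp [hprev, hm] at h
      · have hmem := PySem.List.max?_mem hm
        have : prev = m := by simp [hprev, hm]
        rw [hbp, this]
        exact (List.mem_filter.mp hmem).1
  have hgap : ∀ p ∈ play_days, b < p → day - 1 < p := by
    intro p hp hbp
    by_contra hle
    have : p < day := by omega
    have := hmax_le p hp this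
    omega
  by_cases hc : (day - 1) ∈ play_days
  · -- A returns 0; B's barrier is ≥ day - 1, so the capped difference is ≤ 0
    rw [if_pos hc]
    by_cases hd : day - 1 ≤ 0
    · have : day - 1 - b ≤ 0 := by omega
      omega
    · have := hmax_le (day - 1) hc (by omega)
      have : day - 1 - b ≤ 0 := by omega
      omega
  · rw [if_neg hc]
    by_cases hd : day - 1 ≤ 0
    · -- loop condition fails immediately (t ≤ 0); both sides are 0
      rw [restLoopA, if_neg (by omega)]
      have : day - 1 - b ≤ 0 := by omega
      omega
    · -- day - 1 > 0: apply the loop characterisation with barrier b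
      have hble : b ≤ day - 1 := by
        have : prev ≤ day - 1 := by
          rcases hm : PySem.List.max? fl (fun p => p) with _ | m
          · simp [hprev, hm]; omega
          · have hmem := PySem.List.max?_mem hm
            have : prev = m := by simp [hprev, hm]
            have := (List.mem_filter.mp hmem).2
            simp at this
            omega
        omega
      rw [restLoopA_eq play_days b (by omega) hbmem 0 (day - 1) (by omega) hble hgap]
      omega

-- ===== VERDICT (by name: the statement is the Claim_ definition above) =====
theorem rest_days_before_spec : Claim_equal_rest_days_before := by
  intro play_days day _
  exact rest_days_before_spec_raw play_days day
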